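-- pv_equiv track=rewrite | github.com/nsindex/Smart-Catch | src/topic_summarizers/topic_summarizer.py | _select_focus_words
-- ===== SOURCE A (Python) =====
-- MAX_FOCUS_WORDS = 2
--
-- def _select_focus_words(top_keywords: list[str], word_counts: dict[str, int]) -> list[str]:
--     sorted_words = sorted(word_counts.items(), key=lambda item: (-item[1], item[0]))
--     focus_words = []
--
--     for word, _ in sorted_words:
--         if word in top_keywords:
--             continue
--         if word in focus_words:
--             continue
--         focus_words.append(word)
--         if len(focus_words) >= MAX_FOCUS_WORDS:
--             break
--
--     return focus_words
-- ===== SOURCE B (Python) =====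
-- MAX_FOCUS_WORDS = 2
--
--
-- def _insert_top2(top, e):
--     # insert e into the ordered top-2 list (ascending by (-count, word)), keep 2 best
--     if not top:
--         return [e]
--     a = top[0]
--     if len(top) == 1:
--         return [e, a] if e < a else [a, e]
--     b = top[1]
--     if e < a:
--         return [e, a]
--     if e < b:
--         return [a, e]
--     return [a, b]
--
--
-- def _select_focus_words(top_keywords: list[str], word_counts: dict[str, int]) -> list[str]:
--     keywords = set(top_keywords)
--     top = []  # at most MAX_FOCUS_WORDS pairs (-count, word), kept in ascending order
--     for word, count in word_counts.items():
--         if word in keywords: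
--             continue
--         top = _insert_top2(top, (-count, word))
--     return [word for _, word in top]
-- ===== Notes on version B (the rewrite author's own statement) =====
-- stated objective: faster
-- what changed: B replaces A's full sort of all word_counts items by a single pass that maintains only the current best two (-count, word) candidates in order (with top_keywords turned into a set once); intended as faster by dropping the O(n log n) sort; measured 1.83x at n=262144 on the rev timing family and 1.43x on the random family.
import Mathlib
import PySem

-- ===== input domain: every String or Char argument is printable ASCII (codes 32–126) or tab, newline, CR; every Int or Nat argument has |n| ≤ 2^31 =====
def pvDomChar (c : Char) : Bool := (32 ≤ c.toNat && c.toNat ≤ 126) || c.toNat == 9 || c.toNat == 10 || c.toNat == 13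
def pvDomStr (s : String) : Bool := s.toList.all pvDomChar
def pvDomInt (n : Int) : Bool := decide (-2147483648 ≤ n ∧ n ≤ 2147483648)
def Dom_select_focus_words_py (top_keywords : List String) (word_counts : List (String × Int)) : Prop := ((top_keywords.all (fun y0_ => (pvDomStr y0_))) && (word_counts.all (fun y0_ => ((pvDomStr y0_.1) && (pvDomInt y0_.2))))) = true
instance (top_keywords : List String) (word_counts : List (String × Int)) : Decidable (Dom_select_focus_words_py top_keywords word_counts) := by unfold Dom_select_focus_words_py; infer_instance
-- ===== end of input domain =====

-- B replaces A's full sort of word_counts by a single pass that maintains the current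
-- best two (-count, word) candidates in order (objective: faster; measured 1.4-1.8x).

-- ===== PORT A =====
-- the loop 'for word, _ in sorted_words: …' with its early break
def pvALoop (top_keywords : List String) : List (String × Int) → List String → List String
  | [], focus_words => focus_words
  | (word, _) :: rest, focus_words =>
    if top_keywords.contains word then pvALoop top_keywords rest focus_words
    else if focus_words.contains word then pvALoop top_keywords rest focus_words
    else
      let fw := focus_words ++ [word]
      if 2 ≤ fw.length then fw else pvALoop top_keywords rest fw

def select_focus_words_py (top_keywords : List String) (word_counts : List (String × Int)) : List String :=
  pvALoop top_keywords (PySem.List.sorted2 word_counts (fun it => -it.2) (fun it => it.1)) []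

-- ===== PORT B =====
-- Python tuple comparison e < a on (Int, String) pairs (lexicographic)
def pvLexLt (a b : Int × String) : Bool :=
  decide (a.1 < b.1) || (!decide (b.1 < a.1) && decide (a.2 < b.2))

def pvInsertTop2 (top : List (Int × String)) (e : Int × String) : List (Int × String) :=
  match top with
  | [] => [e]
  | [a] => if pvLexLt e a then [e, a] else [a, e]
  | a :: b :: _ =>
    if pvLexLt e a then [e, a]
    else if pvLexLt e b then [a, e]
    else [a, b]

def select_focus_words_py_alt (top_keywords : List String) (word_counts : List (String × Int)) : List String :=
  let keywords := PySem.Set.ofList top_keywords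
  (word_counts.foldl
    (fun top p => if keywords.contains p.1 then top else pvInsertTop2 top (-p.2, p.1)) []).map Prod.snd

-- ===== PRECONDITION & SPEC =====
-- Pre_ excludes association lists with duplicate keys: those cannot arise from A's
-- Python argument, which is a dict (its keys are necessarily distinct).
def Pre_select_focus_words_py (top_keywords : List String) (word_counts : List (String × Int)) : Prop :=
  (word_counts.map Prod.fst).Nodup
instance (top_keywords : List String) (word_counts : List (String × Int)) : Decidable (Pre_select_focus_words_py top_keywords word_counts) := by unfold Pre_select_focus_words_py; infer_instance

def pvWitness_select_focus_words_py : List String × (List (String × Int)) :=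
  (["the"], [("alpha", 3), ("beta", 3), ("gamma", 1)])

def Spec_select_focus_words_py (top_keywords : List String) (word_counts : List (String × Int)) (out : List String) : Prop := out = select_focus_words_py_alt top_keywords word_counts
instance (top_keywords : List String) (word_counts : List (String × Int)) (out : List String) : Decidable (Spec_select_focus_words_py top_keywords word_counts out) := by unfold Spec_select_focus_words_py; infer_instance

-- ===== CLAIM (what is proved, stated in full; the proofs are below) =====
def Claim_equal_select_focus_words_py : Prop := ∀ (top_keywords : List String) (word_counts : List (String × Int)), Dom_select_focus_words_py top_keywords word_counts → Pre_select_focus_words_py top_keywords word_counts → Spec_select_focus_words_py top_keywords word_counts (select_focus_words_py top_keywords word_counts)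

-- ===== LEMMAS AND PROOFS =====

-- (w, c) ↦ (-c, w), the key A sorts by and the pair B keeps
def pvFlip (p : String × Int) : Int × String := (-p.2, p.1)

lemma pvLexLt_iff (a b : Int × String) :
    pvLexLt a b = true ↔ a.1 < b.1 ∨ (a.1 = b.1 ∧ a.2 < b.2) := by
  simp [pvLexLt, not_lt]
  constructor
  · rintro (h | ⟨h1, h2⟩)
    · exact Or.inl h
    · rcases lt_or_eq_of_le h1 with h | h
      · exact Or.inl h
      · exact Or.inr ⟨h, h2⟩
  · rintro (h | ⟨h1, h2⟩)
    · exact Or.inl h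
    · exact Or.inr ⟨le_of_eq h1, h2⟩
lemma pvLexLt_asymm {a b : Int × String} (h : pvLexLt a b = true) : pvLexLt b a = false := by
  rw [pvLexLt_iff] at h
  rw [Bool.eq_false_iff]
  intro hc
  rw [pvLexLt_iff] at hc
  rcases h with h | ⟨h1, h2⟩ <;> rcases hc with hc | ⟨hc1, hc2⟩ <;> first
    | exact absurd (lt_trans h hc) (lt_irrefl _)
    | omega
    | exact absurd (lt_trans h2 hc2) (lt_irrefl _)
lemma pvLexLt_trans {a b c : Int × String} (h1 : pvLexLt a b = true) (h2 : pvLexLt b c = true) :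
    pvLexLt a c = true := by
  rw [pvLexLt_iff] at *
  rcases h1 with h1 | ⟨h1, h1'⟩ <;> rcases h2 with h2 | ⟨h2, h2'⟩
  · exact Or.inl (lt_trans h1 h2)
  · exact Or.inl (by omega)
  · exact Or.inl (by omega)
  · exact Or.inr ⟨by omega, lt_trans h1' h2'⟩
lemma pvLexLt_total {a b : Int × String} (h : pvLexLt a b = false) : pvLexLt b a = true ∨ a = b := by
  have h' : ¬ (a.1 < b.1 ∨ (a.1 = b.1 ∧ a.2 < b.2)) := by
    rw [← pvLexLt_iff]; simp [h]
  push_neg at h'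
  have h := h'
  rw [pvLexLt_iff]
  rcases lt_trichotomy a.1 b.1 with h1 | h1 | h1
  · exact absurd h1 (not_lt.mpr h.1)
  · rcases lt_trichotomy a.2 b.2 with h2 | h2 | h2
    · exact absurd h2 (not_lt.mpr (h.2 h1))
    · exact Or.inr (Prod.ext h1 h2)
    · exact Or.inl (Or.inr ⟨h1.symm, h2⟩)
  · exact Or.inl (Or.inl h1)
lemma pvLexLt_F2 {x y u : Int × String} (h1 : pvLexLt x y = true) (h2 : pvLexLt u y = false) :
    pvLexLt u x = false := by
  rw [Bool.eq_false_iff]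
  intro hc
  rw [Bool.eq_false_iff] at h2
  exact h2 (pvLexLt_trans hc h1)
lemma pvLexLt_F3 {x y u : Int × String} (h1 : pvLexLt x y = true) (h2 : pvLexLt u y = false) :
    pvLexLt x u = true := by
  rcases pvLexLt_total h2 with h | h
  · exact pvLexLt_trans h1 h
  · exact h ▸ h1
def pvIns (x : Int × String) (s : List (Int × String)) : List (Int × String) :=
  PySem.List.insertBy pvLexLt x s
def pvSortedF (s : List (Int × String)) : Prop :=
  s.Pairwise (fun a b => pvLexLt b a = false)
lemma pvIns_nil (x : Int × String) : pvIns x [] = [x] := rfl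
lemma pvIns_cons (x y : Int × String) (ys : List (Int × String)) :
    pvIns x (y :: ys) = if pvLexLt x y then x :: y :: ys else y :: pvIns x ys := by
  simp [pvIns, PySem.List.insertBy]
lemma pvIns_sorted {s : List (Int × String)} (hs : pvSortedF s) (x : Int × String) :
    pvSortedF (pvIns x s) := by
  induction s with
  | nil => simp [pvIns_nil, pvSortedF]
  | cons y ys ih =>
    simp only [pvSortedF, List.pairwise_cons] at hs
    rw [pvIns_cons]
    by_cases hxy : pvLexLt x y = true
    · simp only [hxy, if_true]
      refine List.Pairwise.cons ?_ (List.Pairwise.cons hs.1 hs.2)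
      intro u hu
      rcases List.mem_cons.mp hu with rfl | hu
      · exact pvLexLt_asymm hxy
      · exact pvLexLt_F2 hxy (hs.1 u hu)
    · rw [Bool.not_eq_true] at hxy
      simp only [hxy, Bool.false_eq_true, if_false]
      refine List.Pairwise.cons ?_ (ih hs.2)
      intro u hu
      rcases (PySem.List.mem_insertBy pvLexLt x u ys).mp hu with rfl | hu
      · exact hxy
      · exact hs.1 u hu
lemma pvIns_all_lt {x : Int × String} {l : List (Int × String)}
    (h : ∀ u ∈ l, pvLexLt x u = true) : pvIns x l = x :: l := by
  cases l with
  | nil => rfl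
  | cons u t => rw [pvIns_cons, if_pos (h u (List.mem_cons_self ..))]
lemma pvIns_filter (q : Int × String → Bool) {s : List (Int × String)} (hs : pvSortedF s)
    (x : Int × String) :
    (pvIns x s).filter q = if q x then pvIns x (s.filter q) else s.filter q := by
  induction s with
  | nil => simp [pvIns_nil, List.filter_cons]
  | cons y ys ih =>
    simp only [pvSortedF, List.pairwise_cons] at hs
    rw [pvIns_cons]
    by_cases hxy : pvLexLt x y = true
    · simp only [hxy, if_true]
      by_cases hqy : q y = true
      · simp [List.filter_cons, hqy, pvIns_cons, hxy]
      · rw [Bool.not_eq_true] at hqy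
        simp only [List.filter_cons, hqy, Bool.false_eq_true, if_false]
        by_cases hqx : q x = true
        · simp only [hqx, if_true]
          rw [pvIns_all_lt]
          intro u hu
          exact pvLexLt_F3 hxy (hs.1 u (List.mem_of_mem_filter hu))
        · simp [hqx]
    · rw [Bool.not_eq_true] at hxy
      simp only [hxy, Bool.false_eq_true, if_false]
      by_cases hqy : q y = true
      · simp only [List.filter_cons, hqy, if_true]
        rw [ih hs.2]
        by_cases hqx : q x = true
        · simp [hqx, pvIns_cons, hxy]
        · simp [hqx]
      · rw [Bool.not_eq_true] at hqy
        simp only [List.filter_cons, hqy, Bool.false_eq_true, if_false]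
        rw [ih hs.2]
lemma pvFoldl_filter (q : Int × String → Bool) (l : List (Int × String)) :
    ∀ {s : List (Int × String)}, pvSortedF s →
    (l.foldl (fun acc x => pvIns x acc) s).filter q
      = (l.filter q).foldl (fun acc x => pvIns x acc) (s.filter q) := by
  induction l with
  | nil => intro s _; simp
  | cons x t ih =>
    intro s hs
    simp only [List.foldl_cons, List.filter_cons]
    rw [ih (pvIns_sorted hs x), pvIns_filter q hs x]
    by_cases hqx : q x = true
    · simp [hqx]
    · simp [hqx]
lemma pvInsertTop2_take (s : List (Int × String)) (e : Int × String) :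
    pvInsertTop2 (s.take 2) e = (pvIns e s).take 2 := by
  match s with
  | [] => rfl
  | [a] =>
    show pvInsertTop2 [a] e = _
    simp only [pvInsertTop2, pvIns_cons, pvIns_nil]
    split_ifs <;> rfl
  | a :: b :: t =>
    show pvInsertTop2 [a, b] e = _
    rw [pvIns_cons, pvIns_cons]
    simp only [pvInsertTop2]
    split_ifs <;> simp

lemma pvBFold (tk : List String) (l : List (String × Int)) :
    ∀ s : List (Int × String),
    l.foldl (fun top p => if tk.contains p.1 then top else pvInsertTop2 top (-p.2, p.1)) (s.take 2)
      = (((l.filter (fun p => !tk.contains p.1)).map pvFlip).foldl (fun acc x => pvIns x acc) s).take 2 := by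
  induction l with
  | nil => intro s; simp
  | cons p t ih =>
    intro s
    simp only [List.foldl_cons, List.filter_cons]
    by_cases hc : tk.contains p.1 = true
    · simp only [hc, if_true, Bool.not_true, Bool.false_eq_true, if_false]
      exact ih s
    · rw [Bool.not_eq_true] at hc
      simp only [hc, Bool.false_eq_true, if_false, Bool.not_false, if_true, List.map_cons,
        List.foldl_cons]
      have : pvInsertTop2 (s.take 2) (-p.2, p.1) = (pvIns (pvFlip p) s).take 2 :=
        pvInsertTop2_take s (pvFlip p)
      rw [this]
      exact ih (pvIns (pvFlip p) s)

lemma pvALoop_eq (tk : List String) (l : List (String × Int)) :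
    ∀ acc : List String,
    (l.map Prod.fst).Nodup → (∀ p ∈ l, acc.contains p.1 = false) → acc.length < 2 →
    pvALoop tk l acc
      = acc ++ ((l.filter (fun p => !tk.contains p.1)).map Prod.fst).take (2 - acc.length) := by
  induction l with
  | nil => intro acc _ _ _; simp [pvALoop]
  | cons p t ih =>
    intro acc hnd hdisj hlen
    obtain ⟨w, c⟩ := p
    simp only [List.map_cons, List.nodup_cons] at hnd
    simp only [pvALoop, List.filter_cons]
    by_cases hc : tk.contains w = true
    · simp only [hc, if_true, Bool.not_true, Bool.false_eq_true, if_false]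
      exact ih acc hnd.2 (fun p hp => hdisj p (List.mem_cons_of_mem _ hp)) hlen
    · rw [Bool.not_eq_true] at hc
      simp only [hc, Bool.false_eq_true, if_false, Bool.not_false, if_true,
        hdisj (w, c) (List.mem_cons_self ..), List.map_cons]
      by_cases h1 : acc.length = 1
      · obtain ⟨a, rfl⟩ : ∃ a, acc = [a] := by
          cases acc with
          | nil => simp at h1
          | cons a as =>
            cases as with
            | nil => exact ⟨a, rfl⟩
            | cons b bs => simp at h1
        simp [List.take]
      · have h0 : acc = [] := by
          cases acc with
          | nil => rfl
          | cons a as => simp only [List.length_cons] at h1 hlen; omega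
        subst h0
        simp only [List.nil_append, List.length_singleton,
          if_neg (by omega : ¬ 2 ≤ 1)]
        rw [ih [w] hnd.2 ?_ (by simp)]
        · simp
        · intro q hq
          simp only [List.contains_cons, List.contains_nil, Bool.or_false]
          have hne : q.1 ≠ w := by
            intro h
            exact hnd.1 (by rw [← h]; exact List.mem_map_of_mem hq)
          simp [hne]

lemma pvMap_insertBy (x : String × Int) (acc : List (String × Int)) :
    (PySem.List.insertBy (fun a b => pvLexLt (pvFlip a) (pvFlip b)) x acc).map pvFlip
      = pvIns (pvFlip x) (acc.map pvFlip) := by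
  induction acc with
  | nil => rfl
  | cons y ys ih =>
    show (PySem.List.insertBy _ x (y :: ys)).map pvFlip = _
    simp only [PySem.List.insertBy, List.map_cons, pvIns_cons]
    by_cases h : pvLexLt (pvFlip x) (pvFlip y) = true
    · simp [h]
    · rw [Bool.not_eq_true] at h
      simp [h, ih]

lemma pvSorted2_eq (wc : List (String × Int)) :
    PySem.List.sorted2 wc (fun it => -it.2) (fun it => it.1) false
      = wc.foldl (fun acc x => PySem.List.insertBy (fun a b => pvLexLt (pvFlip a) (pvFlip b)) x acc) [] := rfl

lemma pvMap_foldl (wc : List (String × Int)) :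
    ∀ acc : List (String × Int),
    (wc.foldl (fun acc x => PySem.List.insertBy (fun a b => pvLexLt (pvFlip a) (pvFlip b)) x acc) acc).map pvFlip
      = (wc.map pvFlip).foldl (fun acc x => pvIns x acc) (acc.map pvFlip) := by
  induction wc with
  | nil => intro acc; simp
  | cons x t ih =>
    intro acc
    simp only [List.foldl_cons, List.map_cons]
    rw [ih, pvMap_insertBy]

-- ===== VERDICT (by name: the statement is the Claim_ definition above) =====
theorem select_focus_words_py_spec : Claim_equal_select_focus_words_py := by
  intro tk wc _ hpre
  unfold Spec_select_focus_words_py select_focus_words_py select_focus_words_py_alt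
  have hbr : ∀ w : String, (PySem.Set.ofList tk).contains w = tk.contains w := by
    intro w; simp [pysem]
  simp only [hbr]
  have hnd : ((PySem.List.sorted2 wc (fun it => -it.2) (fun it => it.1) false).map Prod.fst).Nodup :=
    (List.Perm.map Prod.fst (PySem.List.sorted2_perm wc _ _ false)).nodup_iff.mpr hpre
  rw [pvALoop_eq tk _ [] hnd (by intro r hr; rfl) (by simp)]
  have hB := pvBFold tk wc []
  rw [List.take_nil] at hB
  rw [hB]
  have h1 : (PySem.List.sorted2 wc (fun it => -it.2) (fun it => it.1) false).map pvFlip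
      = (wc.map pvFlip).foldl (fun acc x => pvIns x acc) [] := by
    rw [pvSorted2_eq]; exact pvMap_foldl wc []
  have h2 : ((wc.map pvFlip).foldl (fun acc x => pvIns x acc) []).filter (fun a => !tk.contains a.2)
      = ((wc.map pvFlip).filter (fun a => !tk.contains a.2)).foldl (fun acc x => pvIns x acc) [] := by
    have := pvFoldl_filter (fun a => !tk.contains a.2) (wc.map pvFlip) (s := []) List.Pairwise.nil
    simpa using this
  have h3 : ((PySem.List.sorted2 wc (fun it => -it.2) (fun it => it.1) false).filter
        (fun r => !tk.contains r.1)).map Prod.fst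
      = (((wc.filter (fun r => !tk.contains r.1)).map pvFlip).foldl (fun acc x => pvIns x acc) []).map Prod.snd := by
    have e1 : ((PySem.List.sorted2 wc (fun it => -it.2) (fun it => it.1) false).filter
          (fun r => !tk.contains r.1)).map Prod.fst
        = (((PySem.List.sorted2 wc (fun it => -it.2) (fun it => it.1) false).map pvFlip).filter
            (fun a => !tk.contains a.2)).map Prod.snd := by
      rw [List.filter_map, List.map_map]
      rfl
    have e2 : (wc.map pvFlip).filter (fun a => !tk.contains a.2)
        = (wc.filter (fun r => !tk.contains r.1)).map pvFlip := by
      rw [List.filter_map]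
      rfl
    rw [e1, h1, h2, e2]
  rw [h3, List.nil_append]
  simp [List.map_take]
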